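-- pv_equiv track=rewrite | github.com/c2acsbal/mozi | mozi.py | szamolos
-- ===== SOURCE A (Python) =====
-- def szamolos(teljes):
--     felnotbev = 0
--     diakbev = 0
--     gyerekbev = 0
--     teljesardb = 0
--     dikadb = 0
--     gyerekdb = 0
--
--     for sor in teljes:
--         for sorr in sor:
--             for szek in sorr:
--                 if szek == 1:
--                     felnotbev += 2500
--                     teljesardb += 1
--                 elif szek == 2:
--                     diakbev += 2100
--                     dikadb += 1
--                 elif szek == 3:
--                     gyerekbev += 1300
--                     gyerekdb += 1
--     osszdb = gyerekdb + dikadb + teljesardb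
--     osszbev = gyerekbev + diakbev + felnotbev
--     return osszbev, teljesardb, osszdb
-- ===== SOURCE B (Python) =====
-- def szamolos(teljes):
--     # Collect all seats, sort them, then locate the boundaries of the runs of
--     # 1s, 2s and 3s by binary search; the counts are boundary differences.
--     flat = []
--     for sor in teljes:
--         for sorr in sor:
--             flat += sorr
--     flat.sort()
--
--     def lower(x):
--         lo, hi = 0, len(flat)
--         while lo < hi:
--             mid = (lo + hi) // 2
--             if flat[mid] < x:
--                 lo = mid + 1
--             else:
--                 hi = mid
--         return lo
--
--     b1, b2, b3, b4 = lower(1), lower(2), lower(3), lower(4)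
--     c1, c2, c3 = b2 - b1, b3 - b2, b4 - b3
--     return 2500 * c1 + 2100 * c2 + 1300 * c3, c1, c1 + c2 + c3
-- ===== Notes on version B (the rewrite author's own statement) =====
-- stated objective: alternative
-- what changed: Instead of a triple nested loop updating six running accumulators with an elif chain per seat, B collects all seats into one list, sorts it, finds the run boundaries of the values 1,2,3 by hand-rolled binary search (lower bound), and derives the three counts and the revenue arithmetically from those boundaries.
import Mathlib
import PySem

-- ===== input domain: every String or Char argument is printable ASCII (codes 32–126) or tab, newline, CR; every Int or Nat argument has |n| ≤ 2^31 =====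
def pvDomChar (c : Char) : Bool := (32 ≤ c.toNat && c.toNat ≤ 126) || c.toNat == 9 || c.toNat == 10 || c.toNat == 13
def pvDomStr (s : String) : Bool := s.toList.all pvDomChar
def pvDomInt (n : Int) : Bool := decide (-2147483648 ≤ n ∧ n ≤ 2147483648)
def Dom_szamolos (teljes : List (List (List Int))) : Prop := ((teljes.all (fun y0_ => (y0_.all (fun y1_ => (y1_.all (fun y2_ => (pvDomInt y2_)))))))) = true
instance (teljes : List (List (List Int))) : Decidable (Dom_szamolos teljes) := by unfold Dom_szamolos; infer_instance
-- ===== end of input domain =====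

-- B replaces A's triple nested loop with six running accumulators by a sort of the
-- collected seats plus binary searches for the run boundaries of 1, 2 and 3
-- (objective: alternative algorithm, similar cost).

-- ===== PORT A =====
-- the body of A's innermost loop: update the six running accumulators for one seat
def szStep (st : Int × Int × Int × Int × Int × Int) (szek : Int) :
    Int × Int × Int × Int × Int × Int :=
  let (felnotbev, diakbev, gyerekbev, teljesardb, dikadb, gyerekdb) := st
  if szek = 1 then (felnotbev + 2500, diakbev, gyerekbev, teljesardb + 1, dikadb, gyerekdb)
  else if szek = 2 then (felnotbev, diakbev + 2100, gyerekbev, teljesardb, dikadb + 1, gyerekdb)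
  else if szek = 3 then (felnotbev, diakbev, gyerekbev + 1300, teljesardb, dikadb, gyerekdb + 1)
  else (felnotbev, diakbev, gyerekbev, teljesardb, dikadb, gyerekdb)

def szamolos (teljes : List (List (List Int))) : Int × Int × Int :=
  let st := teljes.foldl (fun st sor =>
    sor.foldl (fun st sorr =>
      sorr.foldl szStep st) st) (0, 0, 0, 0, 0, 0)
  let (felnotbev, diakbev, gyerekbev, teljesardb, dikadb, gyerekdb) := st
  let osszdb := gyerekdb + dikadb + teljesardb
  let osszbev := gyerekbev + diakbev + felnotbev
  (osszbev, teljesardb, osszdb)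

-- ===== PORT B =====
-- Source B's hand-rolled lower-bound binary search ('while lo < hi: …').
-- flat.getD mid 0 is exact for Source B's flat[mid]: the loop maintains 0 ≤ mid < len(flat).
def lowerLoop (flat : List Int) (x : Int) (lo hi : Nat) : Nat :=
  if _h : lo < hi then
    if flat.getD ((lo + hi) / 2) 0 < x then lowerLoop flat x ((lo + hi) / 2 + 1) hi
    else lowerLoop flat x lo ((lo + hi) / 2)
  else lo
termination_by hi - lo
decreasing_by all_goals omega

def szamolos_alt (teljes : List (List (List Int))) : Int × Int × Int :=
  let flat0 := teljes.foldl (fun acc sor =>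
    sor.foldl (fun acc sorr => acc ++ sorr) acc) ([] : List Int)
  let flat := PySem.List.sorted flat0 (fun y => y)
  let lower := fun (x : Int) => ((lowerLoop flat x 0 flat.length : Nat) : Int)
  let b1 := lower 1
  let b2 := lower 2
  let b3 := lower 3
  let b4 := lower 4
  let c1 := b2 - b1
  let c2 := b3 - b2
  let c3 := b4 - b3
  (2500 * c1 + 2100 * c2 + 1300 * c3, c1, c1 + c2 + c3)

-- ===== PRECONDITION & SPEC =====
def Spec_szamolos (teljes : List (List (List Int))) (out : Int × Int × Int) : Prop := out = szamolos_alt teljes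
instance (teljes : List (List (List Int))) (out : Int × Int × Int) : Decidable (Spec_szamolos teljes out) := by unfold Spec_szamolos; infer_instance

-- ===== CLAIM (what is proved, stated in full; the proofs are below) =====
def Claim_equal_szamolos : Prop := ∀ (teljes : List (List (List Int))), Dom_szamolos teljes → Spec_szamolos teljes (szamolos teljes)

-- ===== LEMMAS AND PROOFS =====

-- A's fold computes the three counts (and weighted revenue) of 1,2,3
theorem szStep_foldl (l : List Int) (a b c d e f : Int) :
    l.foldl szStep (a, b, c, d, e, f) =
      (a + 2500 * (l.count 1 : Int), b + 2100 * (l.count 2 : Int),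
       c + 1300 * (l.count 3 : Int), d + (l.count 1 : Int),
       e + (l.count 2 : Int), f + (l.count 3 : Int)) := by
  induction l generalizing a b c d e f with
  | nil => simp
  | cons x xs ih =>
    simp only [List.foldl_cons, szStep, List.count_cons]
    split_ifs with h1 h2 h3 <;> simp_all <;> ring_nf <;> exact ⟨trivial, trivial⟩

-- B's flattening fold is append of the double flatten
theorem foldl_append_eq (l : List (List Int)) (acc : List Int) :
    l.foldl (fun a x => a ++ x) acc = acc ++ l.flatten := by
  induction l generalizing acc with
  | nil => simp
  | cons x xs ih => simp [ih, List.append_assoc]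

theorem flatten_map_flatten (l : List (List (List Int))) :
    (l.map List.flatten).flatten = l.flatten.flatten := by
  induction l with
  | nil => simp
  | cons s r ih => simp [ih]

theorem foldl_flat_eq (teljes : List (List (List Int))) (acc : List Int) :
    teljes.foldl (fun acc sor => sor.foldl (fun a x => a ++ x) acc) acc
      = acc ++ teljes.flatten.flatten := by
  induction teljes generalizing acc with
  | nil => simp
  | cons s rest ih => simp [foldl_append_eq, List.append_assoc, flatten_map_flatten]


-- the binary search returns a splitting point of a ≤-sorted list around x
theorem lowerLoop_spec (flat : List Int) (x : Int)
    (hs : flat.Pairwise (· ≤ ·)) :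
    ∀ lo hi, lo ≤ hi → hi ≤ flat.length →
    (∀ i (h : i < flat.length), i < lo → flat[i] < x) →
    (∀ i (h : i < flat.length), hi ≤ i → x ≤ flat[i]) →
    (lowerLoop flat x lo hi ≤ flat.length ∧
     (∀ i (h : i < flat.length), i < lowerLoop flat x lo hi → flat[i] < x) ∧
     (∀ i (h : i < flat.length), lowerLoop flat x lo hi ≤ i → x ≤ flat[i])) := by
  have hmono : ∀ i j (hij : i ≤ j) (hj : j < flat.length),
      flat[i]'(Nat.lt_of_le_of_lt hij hj) ≤ flat[j] := by
    intro i j hij hj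
    rcases Nat.eq_or_lt_of_le hij with rfl | h
    · exact le_refl _
    · exact List.pairwise_iff_getElem.1 hs i j (by omega) hj h
  intro lo hi
  induction lo, hi using lowerLoop.induct flat x with
  | case1 lo hi h hlt ih =>
    intro hle hhi hlo hhiP
    rw [lowerLoop, dif_pos h, if_pos hlt]
    have hmlt : (lo + hi) / 2 < flat.length := by omega
    apply ih (by omega) hhi
    · intro i hilen hi2
      have : flat[i] ≤ flat[(lo + hi) / 2] := hmono i _ (by omega) hmlt
      have : flat.getD ((lo + hi) / 2) 0 = flat[(lo + hi) / 2] := List.getD_eq_getElem _ _ hmlt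
      omega
    · exact hhiP
  | case2 lo hi h hge ih =>
    intro hle hhi hlo hhiP
    rw [lowerLoop, dif_pos h, if_neg hge]
    have hmlt : (lo + hi) / 2 < flat.length := by omega
    apply ih (by omega) (by omega) hlo
    · intro i hilen hi2
      have h1 : flat[(lo + hi) / 2] ≤ flat[i] := hmono _ i hi2 hilen
      have h2 : flat.getD ((lo + hi) / 2) 0 = flat[(lo + hi) / 2] := List.getD_eq_getElem _ _ hmlt
      omega
  | case3 lo hi h =>
    intro hle hhi hlo hhiP
    rw [lowerLoop, dif_neg h]
    exact ⟨by omega, fun i hi1 hi2 => hlo i hi1 hi2, fun i hi1 hi2 => hhiP i hi1 (by omega)⟩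

-- a splitting point of l around x is countP (· < x)
theorem countP_of_split (l : List Int) (x : Int) (r : Nat)
    (hr : r ≤ l.length)
    (h1 : ∀ i (h : i < l.length), i < r → l[i] < x)
    (h2 : ∀ i (h : i < l.length), r ≤ i → x ≤ l[i]) :
    l.countP (fun y => decide (y < x)) = r := by
  induction l generalizing r with
  | nil =>
    simp only [List.length_nil] at hr
    simp [show r = 0 by omega]
  | cons y t ih =>
    cases r with
    | zero =>
      simp only [List.countP_cons]
      have hy : ¬ (y < x) := by
        have := h2 0 (by simp) (by omega); simpa using this
      have : t.countP (fun y => decide (y < x)) = 0 := by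
        apply ih 0 (by omega)
        · intro i h hi; omega
        · intro i h _
          have := h2 (i + 1) (by simpa using Nat.succ_lt_succ h) (by omega)
          simpa using this
      simp [hy, this]
    | succ k =>
      simp only [List.countP_cons]
      have hy : y < x := by
        have := h1 0 (by simp) (by omega); simpa using this
      have ht : t.countP (fun y => decide (y < x)) = k := by
        apply ih k (by simpa using hr)
        · intro i h hi
          have := h1 (i + 1) (by simpa using Nat.succ_lt_succ h) (by omega)
          simpa using this
        · intro i h hi
          have := h2 (i + 1) (by simpa using Nat.succ_lt_succ h) (by omega)
          simpa using this
      simp [hy, ht]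

-- count x = countP (< x+1) − countP (< x) over the integers
theorem countP_succ (l : List Int) (x : Int) :
    l.countP (fun y => decide (y < x + 1))
      = l.countP (fun y => decide (y < x)) + l.count x := by
  induction l with
  | nil => simp
  | cons y t ih =>
    simp only [List.countP_cons, List.count_cons, ih]
    rcases lt_trichotomy y x with h | h | h
    · have h1 : y < x + 1 := by omega
      simp [h, h1, ne_of_lt h]
      omega
    · subst h
      simp
      omega
    · have h1 : ¬ (y < x + 1) := by omega
      simp [h1, not_lt.2 h.le, ne_of_gt h]

-- the combined statement: lowerLoop at bound x counts elements < x
theorem lower_eq_countP (flat : List Int) (x : Int) (hs : flat.Pairwise (· ≤ ·)) :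
    lowerLoop flat x 0 flat.length = flat.countP (fun y => decide (y < x)) := by
  obtain ⟨h0, h1, h2⟩ := lowerLoop_spec flat x hs 0 flat.length (by omega) (le_refl _)
    (fun i h hi => by omega) (fun i h hi => by omega)
  exact (countP_of_split flat x _ h0 h1 h2).symm

theorem szamolos_eq (teljes : List (List (List Int))) :
    szamolos teljes = szamolos_alt teljes := by
  unfold szamolos szamolos_alt
  have hA : teljes.foldl (fun st sor => sor.foldl (fun st sorr => sorr.foldl szStep st) st)
      ((0, 0, 0, 0, 0, 0) : Int × Int × Int × Int × Int × Int)
      = (teljes.flatten.flatten).foldl szStep (0, 0, 0, 0, 0, 0) := by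
    rw [List.foldl_flatten, List.foldl_flatten]
  rw [hA, szStep_foldl, foldl_flat_eq]
  simp only [List.nil_append]
  set L := teljes.flatten.flatten with hL
  set flat := PySem.List.sorted L (fun y => y) with hflat
  have hs : flat.Pairwise (· ≤ ·) := PySem.List.sorted_pairwise L (fun y => y)
  have hperm : flat.Perm L := PySem.List.sorted_perm L (fun y => y) false
  have hcount : ∀ x : Int, flat.count x = L.count x := fun x => hperm.count_eq x
  have hlow : ∀ x : Int, lowerLoop flat x 0 flat.length
      = flat.countP (fun y => decide (y < x)) := fun x => lower_eq_countP flat x hs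
  have key : ∀ x : Int,
      (lowerLoop flat (x + 1) 0 flat.length : Int) - (lowerLoop flat x 0 flat.length : Int)
        = (L.count x : Int) := by
    intro x
    rw [hlow, hlow, ← hcount x]
    have := countP_succ flat x
    omega
  have k1 := key 1
  have k2 := key 2
  have k3 := key 3
  norm_num at k1 k2 k3
  simp only [Prod.mk.injEq]
  refine ⟨?_, ?_, ?_⟩ <;> simp only [← k1, ← k2, ← k3] <;> ring

-- ===== VERDICT (by name: the statement is the Claim_ definition above) =====
theorem szamolos_spec : Claim_equal_szamolos := by
  intro teljes _
  exact szamolos_eq teljes
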